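-- pv_equiv track=rewrite | github.com/loujie0822/DeepIE | utils/metrics.py | _bmeso_tag_to_spans
-- ===== SOURCE A (Python) =====
-- def _bmeso_tag_to_spans(tags,text, ignore_labels=None):
--     r"""
--     给定一个tags的lis，比如['O', 'B-singer', 'M-singer', 'E-singer', 'O', 'O']。
--     返回[('singer', (1, 4))] (左闭右开区间)
--
--     :param tags: List[str],
--     :param ignore_labels: List[str], 在该list中的label将被忽略
--     :return: List[Tuple[str, List[int, int]]]. [(label，[start, end])]
--     """
--     ignore_labels = set(ignore_labels) if ignore_labels else set()
--
--     spans = []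
--     prev_bmes_tag = None
--     for idx, tag in enumerate(tags):
--         tag = tag.lower()
--         bmes_tag, label = tag[:1], tag[2:]
--         if bmes_tag in ('b', 's'):
--             spans.append((label, [idx, idx]))
--         elif bmes_tag in ('m', 'e') and prev_bmes_tag in ('b', 'm') and label == spans[-1][0]:
--             spans[-1][1][1] = idx
--         elif bmes_tag == 'o':
--             pass
--         else:
--             spans.append((label, [idx, idx]))
--         prev_bmes_tag = bmes_tag
--
--     ent_lst = []
--     for span in spans:
--         ent_type=span[0]
--         start=span[1][0]
--         end=span[1][1]
--         if start == 1 and end > len(text):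
--             continue
--         ent_name = text[start - 1:end]
--         ent_lst.append((start-1, end-1, ent_name, ent_type.upper()))
--
--
--     return ent_lst
-- ===== SOURCE B (Python) =====
-- def _bmeso_tag_to_spans(tags, text, ignore_labels=None):
--     ent_lst = []
--     open_span = None          # (label, start, end) of the span still being built
--     prev_bmes_tag = None
--
--     def flush():
--         if open_span is not None:
--             label, start, end = open_span
--             if not (start == 1 and end > len(text)):
--                 ent_lst.append((start - 1, end - 1, text[start - 1:end], label.upper()))
--
--     for idx, tag in enumerate(tags):
--         tag = tag.lower()
--         bmes_tag, label = tag[:1], tag[2:]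
--         if bmes_tag == 'o':
--             pass
--         elif (bmes_tag in ('m', 'e') and prev_bmes_tag in ('b', 'm')
--               and open_span is not None and label == open_span[0]):
--             open_span = (label, open_span[1], idx)
--         else:
--             flush()
--             open_span = (label, idx, idx)
--         prev_bmes_tag = bmes_tag
--     flush()
--     return ent_lst
-- ===== Notes on version B (the rewrite author's own statement) =====
-- stated objective: simpler
-- what changed: B replaces A's two passes (build a full spans list with in-place last-element mutation, then convert/filter it) by a single pass that keeps only the currently open span and emits each span through the filter the moment it is closed.
import Mathlib
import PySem

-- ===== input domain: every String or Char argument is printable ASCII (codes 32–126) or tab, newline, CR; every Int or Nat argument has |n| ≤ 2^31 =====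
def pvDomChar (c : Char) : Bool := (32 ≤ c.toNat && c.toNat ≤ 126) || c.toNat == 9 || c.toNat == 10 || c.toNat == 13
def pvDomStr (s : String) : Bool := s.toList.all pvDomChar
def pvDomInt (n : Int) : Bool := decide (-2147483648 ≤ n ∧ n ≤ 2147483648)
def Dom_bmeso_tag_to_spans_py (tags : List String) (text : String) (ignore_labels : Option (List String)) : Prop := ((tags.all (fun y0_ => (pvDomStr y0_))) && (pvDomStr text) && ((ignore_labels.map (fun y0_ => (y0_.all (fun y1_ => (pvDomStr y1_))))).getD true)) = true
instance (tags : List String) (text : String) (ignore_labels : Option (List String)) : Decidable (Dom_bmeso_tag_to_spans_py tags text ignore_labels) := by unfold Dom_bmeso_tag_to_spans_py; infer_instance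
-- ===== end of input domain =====

-- B fuses A's two passes (build a spans list, then convert/filter it) into one pass that
-- maintains only the currently open span and emits each finished span immediately (objective: simpler).

-- ===== PORT A =====
-- A's first loop body: state = (spans, prev_bmes_tag); spans entries are (label, start, end)
-- (a Python span is (label, [start, end]); the in-place 'spans[-1][1][1] = idx' becomes
-- replacing the last element).  The Python access 'spans[-1][0]' is guarded by
-- 'prev_bmes_tag in ('b','m')' which guarantees spans is nonempty, so matching on
-- getLast? (with the none case never reached delivering False / the unchanged list) is exact.
def pvAStep (st : List (String × Int × Int) × Option String) (p : Int × String) :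
    List (String × Int × Int) × Option String :=
  let tag := PySem.Str.lower p.2
  let bmes_tag := PySem.Str.slice tag none (some 1)
  let label := PySem.Str.slice tag (some 2) none
  if bmes_tag = "b" ∨ bmes_tag = "s" then
    (st.1 ++ [(label, p.1, p.1)], some bmes_tag)
  else if (bmes_tag = "m" ∨ bmes_tag = "e") ∧ (st.2 = some "b" ∨ st.2 = some "m") ∧
          st.1.getLast?.map Prod.fst = some label then
    (st.1.dropLast ++ (st.1.getLast?.map (fun s => (s.1, s.2.1, p.1))).toList, some bmes_tag)
  else if bmes_tag = "o" then
    (st.1, some bmes_tag)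
  else
    (st.1 ++ [(label, p.1, p.1)], some bmes_tag)

def bmeso_tag_to_spans_py (tags : List String) (text : String) (ignore_labels : Option (List String)) : List (Int × Int × String × String) :=
  -- 'ignore_labels = set(ignore_labels) if ignore_labels else set()' — built, never used
  let _igs : List String := match ignore_labels with | some l => PySem.Set.ofList l | none => []
  let st := (PySem.List.enumerate tags 0).foldl pvAStep ([], none)
  st.1.foldl (fun ent_lst span =>
    let ent_type := span.1
    let start := span.2.1
    let «end» := span.2.2
    if start = 1 ∧ (PySem.Str.len text : Int) < «end» then ent_lst
    else ent_lst ++ [(start - 1, «end» - 1,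
          PySem.Str.slice text (some (start - 1)) (some «end»), PySem.Str.upper ent_type)]) []

-- ===== PORT B =====
-- B's flush(): emit the open span (if any) through the filter, with offsets and .upper()
def pvBFlush (text : String) (ent_lst : List (Int × Int × String × String))
    (open_span : Option (String × Int × Int)) : List (Int × Int × String × String) :=
  match open_span with
  | none => ent_lst
  | some s =>
    if s.2.1 = 1 ∧ (PySem.Str.len text : Int) < s.2.2 then ent_lst
    else ent_lst ++ [(s.2.1 - 1, s.2.2 - 1,
          PySem.Str.slice text (some (s.2.1 - 1)) (some s.2.2), PySem.Str.upper s.1)]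

-- B's loop body: state = (ent_lst, open_span, prev_bmes_tag)
def pvBStep (text : String)
    (st : List (Int × Int × String × String) × Option (String × Int × Int) × Option String)
    (p : Int × String) :
    List (Int × Int × String × String) × Option (String × Int × Int) × Option String :=
  let tag := PySem.Str.lower p.2
  let bmes_tag := PySem.Str.slice tag none (some 1)
  let label := PySem.Str.slice tag (some 2) none
  if bmes_tag = "o" then
    (st.1, st.2.1, some bmes_tag)
  else if (bmes_tag = "m" ∨ bmes_tag = "e") ∧ (st.2.2 = some "b" ∨ st.2.2 = some "m") ∧
          st.2.1.map Prod.fst = some label then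
    (st.1, st.2.1.map (fun s => (label, s.2.1, p.1)), some bmes_tag)
  else
    (pvBFlush text st.1 st.2.1, some (label, p.1, p.1), some bmes_tag)

def bmeso_tag_to_spans_py_alt (tags : List String) (text : String) (ignore_labels : Option (List String)) : List (Int × Int × String × String) :=
  let st := (PySem.List.enumerate tags 0).foldl (pvBStep text) ([], none, none)
  pvBFlush text st.1 st.2.1

-- ===== PRECONDITION & SPEC =====
def Spec_bmeso_tag_to_spans_py (tags : List String) (text : String) (ignore_labels : Option (List String)) (out : List (Int × Int × String × String)) : Prop := out = bmeso_tag_to_spans_py_alt tags text ignore_labels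
instance (tags : List String) (text : String) (ignore_labels : Option (List String)) (out : List (Int × Int × String × String)) : Decidable (Spec_bmeso_tag_to_spans_py tags text ignore_labels out) := by unfold Spec_bmeso_tag_to_spans_py; infer_instance

-- ===== CLAIM (what is proved, stated in full; the proofs are below) =====
def Claim_equal_bmeso_tag_to_spans_py : Prop := ∀ (tags : List String) (text : String) (ignore_labels : Option (List String)), Dom_bmeso_tag_to_spans_py tags text ignore_labels → Spec_bmeso_tag_to_spans_py tags text ignore_labels (bmeso_tag_to_spans_py tags text ignore_labels)

-- ===== LEMMAS AND PROOFS =====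

-- the conversion of one finished span (A's second-loop body / B's flush, as a list of 0 or 1 entries)
def pvConv (text : String) (span : String × Int × Int) : List (Int × Int × String × String) :=
  if span.2.1 = 1 ∧ (PySem.Str.len text : Int) < span.2.2 then []
  else [(span.2.1 - 1, span.2.2 - 1,
        PySem.Str.slice text (some (span.2.1 - 1)) (some span.2.2), PySem.Str.upper span.1)]

lemma pvBFlush_eq (text : String) (acc : List (Int × Int × String × String))
    (o : Option (String × Int × Int)) :
    pvBFlush text acc o = acc ++ o.toList.flatMap (pvConv text) := by
  cases o with
  | none => simp [pvBFlush]
  | some s =>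
    simp only [pvBFlush, pvConv, Option.toList, List.flatMap_cons, List.flatMap_nil]
    split <;> simp

lemma pvDropLast_append_getLast {α : Type} (l : List α) :
    l.dropLast ++ l.getLast?.toList = l := by
  induction l with
  | nil => rfl
  | cons x xs ih =>
    cases xs with
    | nil => rfl
    | cons y ys => simpa using ih

-- the abstraction map from A's loop state to B's loop state
def pvR (text : String) (st : List (String × Int × Int) × Option String) :
    List (Int × Int × String × String) × Option (String × Int × Int) × Option String :=
  (st.1.dropLast.flatMap (pvConv text), st.1.getLast?, st.2)

lemma pvStep_commute (text : String) (st : List (String × Int × Int) × Option String)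
    (p : Int × String) :
    pvBStep text (pvR text st) p = pvR text (pvAStep st p) := by
  obtain ⟨spans, prev⟩ := st
  simp only [pvAStep, pvBStep, pvR]
  generalize PySem.Str.slice (PySem.Str.lower p.2) none (some 1) = bm
  generalize PySem.Str.slice (PySem.Str.lower p.2) (some 2) none = lb
  by_cases hbs : bm = "b" ∨ bm = "s"
  · -- A appends a new span; B flushes the open one and opens a new one
    have hno : ¬ bm = "o" := by rcases hbs with h | h <;> subst h <;> decide
    have hnme : ¬ (bm = "m" ∨ bm = "e") := by
      rcases hbs with h | h <;> subst h <;> decide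
    simp only [if_pos hbs, if_neg hno]
    rw [if_neg (by tauto)]
    refine Prod.ext ?_ ?_
    · simp only [pvBFlush_eq]
      rw [← List.flatMap_append, pvDropLast_append_getLast]
      simp
    · simp
  · simp only [if_neg hbs]
    by_cases hc : (bm = "m" ∨ bm = "e") ∧ (prev = some "b" ∨ prev = some "m") ∧
        spans.getLast?.map Prod.fst = some lb
    · -- continuation: extend the last / open span in place
      have hno : ¬ bm = "o" := by rcases hc.1 with h | h <;> subst h <;> decide
      rw [if_pos hc, if_neg hno, if_pos hc]
      obtain ⟨h1, h2, h3⟩ := hc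
      cases hl : spans.getLast? with
      | none => simp [hl] at h3
      | some s =>
        have hs1 : s.1 = lb := by rw [hl] at h3; simpa using h3
        have hspans : spans = spans.dropLast ++ [s] := by
          conv_lhs => rw [← pvDropLast_append_getLast spans]
          rw [hl]; rfl
        refine Prod.ext ?_ (Prod.ext ?_ rfl)
        · rw [hspans, List.dropLast_concat]
          simp
        · rw [hspans, List.dropLast_concat]
          simp [hs1]
    · rw [if_neg hc, if_neg hc]
      by_cases ho : bm = "o"
      · rw [if_pos ho, if_pos ho]
      · -- catch-all: same shape as the b/s case
        rw [if_neg ho, if_neg ho]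
        refine Prod.ext ?_ ?_
        · simp only [pvBFlush_eq]
          rw [← List.flatMap_append, pvDropLast_append_getLast]
          simp
        · simp

lemma pvLoop_commute (text : String) (l : List (Int × String))
    (st : List (String × Int × Int) × Option String) :
    l.foldl (pvBStep text) (pvR text st) = pvR text (l.foldl pvAStep st) := by
  induction l generalizing st with
  | nil => rfl
  | cons p ps ih => rw [List.foldl_cons, List.foldl_cons, pvStep_commute, ih]

-- ===== VERDICT (by name: the statement is the Claim_ definition above) =====
theorem bmeso_tag_to_spans_py_spec : Claim_equal_bmeso_tag_to_spans_py := by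
  intro tags text ignore_labels _hdom
  unfold Spec_bmeso_tag_to_spans_py bmeso_tag_to_spans_py bmeso_tag_to_spans_py_alt
  have h0 : (([], none, none) :
      List (Int × Int × String × String) × Option (String × Int × Int) × Option String) =
      pvR text ([], none) := rfl
  rw [h0, pvLoop_commute]
  set stA := (PySem.List.enumerate tags 0).foldl pvAStep ([], none) with hstA
  -- A's second loop is 'acc ++ pvConv span' pointwise, hence a flatMap
  have hbody : (fun (ent_lst : List (Int × Int × String × String))
        (span : String × Int × Int) =>
      if span.2.1 = 1 ∧ (PySem.Str.len text : Int) < span.2.2 then ent_lst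
      else ent_lst ++ [(span.2.1 - 1, span.2.2 - 1,
            PySem.Str.slice text (some (span.2.1 - 1)) (some span.2.2),
            PySem.Str.upper span.1)]) =
      fun ent_lst span => ent_lst ++ pvConv text span := by
    funext acc span
    simp only [pvConv]
    split <;> simp
  simp only [hbody]
  rw [PySem.List.foldl_append_eq_flatMap]
  rw [pvR, pvBFlush_eq, ← List.flatMap_append, pvDropLast_append_getLast]
  simp
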